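-- pv_equiv track=rewrite | github.com/YoussifMedhate/DSA-Home-Workes | Home-Work4/1-stack-application/1-python/2-infix_validation.py | check_infix
-- ===== SOURCE A (Python) =====
-- def check_infix(expression: str) -> bool:
--     operatores = ('+', '-', '*', '/')
--     l = len(expression)
--
--     if not expression:
--         return False
--
--     if expression[0] in operatores or expression[-1] in operatores:
--         return False
--
--     for i in range(l - 1):
--         if expression[i] in operatores and expression[i + 1] in operatores:
--             return False
--
--         if (not expression[i].isdigit() and
--             expression[i] not in operatores and
--             expression[i] not in ('(', ')')):
--             return False
--
--     last = expression[-1]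
--     if (not last.isdigit() and
--         last not in operatores and
--         last not in ('(', ')')):
--         return False
--
--     return True
-- ===== SOURCE B (Python) =====
-- def check_infix(expression: str) -> bool:
--     if not expression:
--         return False
--     segments = []
--     cur = []
--     for ch in expression:
--         if ch in '+-*/':
--             segments.append(cur)
--             cur = []
--         else:
--             cur.append(ch)
--     segments.append(cur)
--     return all(seg and all(c.isdigit() or c in '()' for c in seg)
--                for seg in segments)
-- ===== Notes on version B (the rewrite author's own statement) =====
-- stated objective: alternative
-- what changed: A's single fused index loop checking endpoints, adjacent operators and per-character legality is replaced by a splitter: B cuts the string into segments at operator characters and accepts iff every segment is nonempty (which subsumes the endpoint and adjacent-operator rules) and consists only of digits and parentheses.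
import Mathlib
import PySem

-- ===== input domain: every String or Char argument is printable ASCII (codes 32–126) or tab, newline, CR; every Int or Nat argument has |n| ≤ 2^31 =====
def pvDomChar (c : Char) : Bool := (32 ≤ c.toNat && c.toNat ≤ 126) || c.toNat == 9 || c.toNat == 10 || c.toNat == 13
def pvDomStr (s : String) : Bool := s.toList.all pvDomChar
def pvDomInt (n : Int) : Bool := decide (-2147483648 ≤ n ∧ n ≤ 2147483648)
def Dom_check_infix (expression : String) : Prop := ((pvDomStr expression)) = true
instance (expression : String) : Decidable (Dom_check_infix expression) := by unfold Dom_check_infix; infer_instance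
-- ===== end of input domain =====

-- B replaces A's fused index loop (endpoint + adjacency + legality checks) by an
-- operator-splitting pass: valid iff every operator-separated segment is a nonempty
-- run of digits/parentheses.  Objective: alternative algorithm, same cost.


-- ===== PORT A =====
-- membership in the tuple ('+', '-', '*', '/')
def isOpA (c : Char) : Bool := c == '+' || c == '-' || c == '*' || c == '/'

-- A's 'for i in range(l - 1)' loop as structural recursion on the remaining characters;
-- Char.isDigit is exact for Python's str.isdigit on the ASCII domain.
def loopA : List Char → Bool
  | c :: d :: rest =>
      if isOpA c && isOpA d then false
      else if !c.isDigit && !isOpA c && !(c == '(' || c == ')') then false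
      else loopA (d :: rest)
  | _ => true

def check_infix (expression : String) : Bool :=
  match expression.toList with
  | [] => false
  | c :: cs =>
      if isOpA c || isOpA (List.getLastD cs c) then false
      else if loopA (c :: cs) = false then false
      else
        let last := List.getLastD cs c
        if !last.isDigit && !isOpA last && !(last == '(' || last == ')') then false
        else true

-- ===== PORT B =====
def isOpB (c : Char) : Bool := c == '+' || c == '-' || c == '*' || c == '/'

-- 'c.isdigit() or c in "()"'
def goodB (c : Char) : Bool := c.isDigit || c == '(' || c == ')'

-- 'seg and all(good c for c in seg)'
def goodSeg (s : List Char) : Bool := !s.isEmpty && s.all goodB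

def check_infix_alt (expression : String) : Bool :=
  match expression.toList with
  | [] => false
  | l =>
      -- the for-loop building (segments, cur), then the final append and the all()
      let p := l.foldl
        (fun (acc : List (List Char) × List Char) ch =>
          if isOpB ch then (acc.1 ++ [acc.2], ([] : List Char))
          else (acc.1, acc.2 ++ [ch])) ([], [])
      (p.1 ++ [p.2]).all goodSeg

-- ===== PRECONDITION & SPEC =====
def Spec_check_infix (expression : String) (out : Bool) : Prop := out = check_infix_alt expression
instance (expression : String) (out : Bool) : Decidable (Spec_check_infix expression out) := by unfold Spec_check_infix; infer_instance

-- ===== CLAIM (what is proved, stated in full; the proofs are below) =====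
def Claim_equal_check_infix : Prop := ∀ (expression : String), Dom_check_infix expression → Spec_check_infix expression (check_infix expression)

-- ===== LEMMAS AND PROOFS =====

-- the segment list B's fold produces, written as structural recursion
def segsWith (cur : List Char) : List Char → List (List Char)
  | [] => [cur]
  | c :: cs => if isOpB c then cur :: segsWith [] cs else segsWith (cur ++ [c]) cs

-- 'valid continuation' automaton: Tok l = the rest l is valid given we are inside a segment
def Tok : List Char → Bool
  | [] => true
  | c :: cs =>
      if isOpB c then
        match cs with
        | [] => false
        | d :: ds => !isOpB d && Tok (d :: ds)
      else goodB c && Tok cs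

-- valid at a segment boundary
def Uok : List Char → Bool
  | [] => false
  | c :: cs => !isOpB c && Tok (c :: cs)

theorem foldl_segs (l : List Char) : ∀ (ss : List (List Char)) (cur : List Char),
    (l.foldl (fun (acc : List (List Char) × List Char) ch =>
        if isOpB ch then (acc.1 ++ [acc.2], ([] : List Char))
        else (acc.1, acc.2 ++ [ch])) (ss, cur)).1 ++
      [(l.foldl (fun (acc : List (List Char) × List Char) ch =>
        if isOpB ch then (acc.1 ++ [acc.2], ([] : List Char))
        else (acc.1, acc.2 ++ [ch])) (ss, cur)).2] = ss ++ segsWith cur l := by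
  induction l with
  | nil => intro ss cur; simp [segsWith]
  | cons c cs ih =>
      intro ss cur
      by_cases h : isOpB c = true
      · simp [List.foldl_cons, h, segsWith, ih]
      · simp [List.foldl_cons, h, segsWith, ih]

theorem Tok_op (c : Char) (cs : List Char) (h : isOpB c = true) :
    Tok (c :: cs) = Uok cs := by
  cases cs with
  | nil => simp [Tok, Uok, h]
  | cons d ds => simp only [Tok, Uok, h, if_true]

theorem Tok_notop (c : Char) (cs : List Char) (h : isOpB c = false) :
    Tok (c :: cs) = (goodB c && Tok cs) := by
  cases cs with
  | nil => simp [Tok, h]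
  | cons d ds => simp [Tok, h]

theorem segs_all (l : List Char) : ∀ cur,
    (segsWith cur l).all goodSeg =
      (if cur.isEmpty then Uok l else cur.all goodB && Tok l) := by
  induction l with
  | nil =>
      intro cur
      cases cur <;> simp [segsWith, goodSeg, Uok, Tok]
  | cons c cs ih =>
      intro cur
      cases h : isOpB c with
      | true =>
          cases cur with
          | nil => simp [segsWith, h, goodSeg, Uok, Tok_op c cs h]
          | cons x xs =>
              simp [segsWith, h, goodSeg, Uok, ih, Tok_op c cs h, Bool.and_assoc]
      | false =>
          cases cur with
          | nil => simp [segsWith, h, Uok, ih, Tok_notop c cs h]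
          | cons x xs =>
              simp [segsWith, h, ih, Tok_notop c cs h, Bool.and_assoc]

def legalA (c : Char) : Bool := c.isDigit || isOpB c || c == '(' || c == ')'

theorem legalA_eq (c : Char) : legalA c = (goodB c || isOpB c) := by
  cases h1 : c.isDigit <;> cases h2 : isOpB c <;> simp [legalA, goodB, h1, h2]

-- A's loop + last check, against the automaton
theorem loopA_tok (cs : List Char) : ∀ c,
    (!isOpB (List.getLastD cs c) && loopA (c :: cs) && legalA (List.getLastD cs c)) =
      Tok (c :: cs) := by
  induction cs with
  | nil =>
      intro c
      rw [legalA_eq]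
      cases h1 : isOpB c <;> cases h2 : goodB c <;>
        simp [loopA, Tok, List.getLastD, h1, h2]
  | cons d rest ih =>
      intro c
      have hA : isOpA = isOpB := rfl
      have hleg : ∀ x : Char,
          (!x.isDigit && !isOpB x && !(x == '(' || x == ')')) = !legalA x := by
        intro x; simp [legalA, Bool.and_assoc]
      rw [List.getLastD_cons]
      have hloop : loopA (c :: d :: rest) =
          (!(isOpB c && isOpB d) && legalA c && loopA (d :: rest)) := by
        rw [loopA, hA, hleg]
        cases h1 : (isOpB c && isOpB d) <;> cases h2 : legalA c <;> simp
      rw [hloop]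
      have hT : Tok (c :: d :: rest) =
          (if isOpB c then !isOpB d && Tok (d :: rest) else goodB c && Tok (d :: rest)) := by
        simp [Tok]
      rw [hT, ← ih d]
      rw [legalA_eq]
      cases h1 : isOpB c <;> cases h2 : isOpB d <;> cases h3 : goodB c <;>
        cases h4 : isOpB (List.getLastD rest d) <;>
        cases h5 : loopA (d :: rest) <;> cases h6 : legalA (List.getLastD rest d) <;>
        simp

theorem lastCheck (x : Char) :
    (!x.isDigit && !isOpA x && !(x == '(' || x == ')')) = (!goodB x && !isOpB x) := by
  have hA : isOpA x = isOpB x := rfl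
  cases h1 : x.isDigit <;> cases h2 : isOpB x <;>
    simp [goodB, hA, h1, h2, Bool.and_comm]

-- ===== VERDICT (by name: the statement is the Claim_ definition above) =====
theorem check_infix_spec : Claim_equal_check_infix := by
  intro e _
  unfold Spec_check_infix check_infix check_infix_alt
  cases h : e.toList with
  | nil => rfl
  | cons c cs =>
      simp only [lastCheck]
      rw [foldl_segs (c :: cs) [] [], List.nil_append, segs_all]
      simp only [List.isEmpty_nil, Uok, if_true]
      rw [← loopA_tok cs c, legalA_eq]
      have hA : isOpA = isOpB := rfl
      rw [hA]
      cases h1 : isOpB c <;> cases h2 : isOpB (List.getLastD cs c) <;>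
        cases h3 : loopA (c :: cs) <;> cases h4 : goodB (List.getLastD cs c) <;>
        simp
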